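-- pv_equiv track=rewrite | github.com/dunnowhattogive/Advent-Of-Code | 2025/Day3/puzzle5.py | max_two_digit_from_line
-- ===== SOURCE A (Python) =====
-- def max_two_digit_from_line(s: str) -> int:
-- 	if len(s) < 2:
-- 		return 0
-- 	max_val = 0
-- 	for i in range(len(s) - 1):
-- 		a = ord(s[i]) - 48
-- 		for j in range(i + 1, len(s)):
-- 			b = ord(s[j]) - 48
-- 			val = 10 * a + b
-- 			if val > max_val:
-- 				max_val = val
-- 	return max_val
-- ===== SOURCE B (Python) =====
-- def max_two_digit_from_line(s: str) -> int:
--     # Single right-to-left pass: keep the max digit-value of the suffix (suf)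
--     # and the best pair value so far; best starts at 0 exactly as A's max_val.
--     if len(s) < 2:
--         return 0
--     best = 0
--     suf = ord(s[-1]) - 48
--     for i in range(len(s) - 2, -1, -1):
--         a = ord(s[i]) - 48
--         v = 10 * a + suf
--         if v > best:
--             best = v
--         if a > suf:
--             suf = a
--     return best
-- ===== Notes on version B (the rewrite author's own statement) =====
-- stated objective: faster
-- what changed: Replaced the O(n^2) all-pairs scan by a single right-to-left pass that maintains the maximum digit-value of the suffix and combines it with each earlier position.
import Mathlib
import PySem

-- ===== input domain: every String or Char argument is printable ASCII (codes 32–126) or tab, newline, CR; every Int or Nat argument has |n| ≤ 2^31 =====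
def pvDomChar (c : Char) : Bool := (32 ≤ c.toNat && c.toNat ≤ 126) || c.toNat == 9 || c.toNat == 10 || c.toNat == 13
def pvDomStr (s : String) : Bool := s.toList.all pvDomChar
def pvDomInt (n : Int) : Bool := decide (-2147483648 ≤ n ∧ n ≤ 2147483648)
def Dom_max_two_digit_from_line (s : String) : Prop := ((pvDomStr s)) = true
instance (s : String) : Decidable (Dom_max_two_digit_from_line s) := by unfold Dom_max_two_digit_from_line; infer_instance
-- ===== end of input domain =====

-- B replaces A's O(n^2) all-pairs scan by one right-to-left pass keeping the suffix maximum (objective: faster, asymptotic).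

-- ===== PORT A =====
-- nested index loops; s[i] is always in range here, so the pyGetD default ' ' is unreachable
def max_two_digit_from_line (s : String) : Int :=
  if PySem.Str.len s < 2 then 0
  else
    (PySem.List.pyRange 0 (PySem.Str.len s - 1) 1).foldl
      (fun maxVal i =>
        let a : Int := ((PySem.List.pyGetD s.toList i ' ').toNat : Int) - 48
        (PySem.List.pyRange (i + 1) (PySem.Str.len s) 1).foldl
          (fun m j =>
            let b : Int := ((PySem.List.pyGetD s.toList j ' ').toNat : Int) - 48
            let val := 10 * a + b
            if val > m then val else m)
          maxVal)
      0

-- ===== PORT B =====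
-- B's right-to-left loop as structural recursion: returns (best, suffix max of digit values);
-- the [] case is unreachable (only called on nonempty lists)
def pvPairBest : List Char → Int × Int
  | [] => (0, 0)
  | [c] => (0, (c.toNat : Int) - 48)
  | c :: x :: xs =>
      let p := pvPairBest (x :: xs)
      let a : Int := (c.toNat : Int) - 48
      let v := 10 * a + p.2
      (if v > p.1 then v else p.1, if a > p.2 then a else p.2)

def max_two_digit_from_line_alt (s : String) : Int :=
  if PySem.Str.len s < 2 then 0
  else (pvPairBest s.toList).1

-- ===== PRECONDITION & SPEC =====
def Spec_max_two_digit_from_line (s : String) (out : Int) : Prop := out = max_two_digit_from_line_alt s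
instance (s : String) (out : Int) : Decidable (Spec_max_two_digit_from_line s out) := by unfold Spec_max_two_digit_from_line; infer_instance

-- ===== CLAIM (what is proved, stated in full; the proofs are below) =====
def Claim_equal_max_two_digit_from_line : Prop := ∀ (s : String), Dom_max_two_digit_from_line s → Spec_max_two_digit_from_line s (max_two_digit_from_line s)

-- ===== LEMMAS AND PROOFS =====

lemma pvPairBest_cons (c x : Char) (xs : List Char) :
    pvPairBest (c :: x :: xs) =
      (if 10 * ((c.toNat : Int) - 48) + (pvPairBest (x :: xs)).2 > (pvPairBest (x :: xs)).1
         then 10 * ((c.toNat : Int) - 48) + (pvPairBest (x :: xs)).2 else (pvPairBest (x :: xs)).1,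
       if ((c.toNat : Int) - 48) > (pvPairBest (x :: xs)).2
         then ((c.toNat : Int) - 48) else (pvPairBest (x :: xs)).2) := rfl

lemma pvPairBest_fst_nonneg (l : List Char) : 0 ≤ (pvPairBest l).1 := by
  match l with
  | [] => simp [pvPairBest]
  | [c] => simp [pvPairBest]
  | c :: x :: xs =>
    have ih := pvPairBest_fst_nonneg (x :: xs)
    rw [pvPairBest_cons]
    dsimp only
    split <;> omega

-- A's inner loop from index j0 computes max m (10*a + suffix max of digit values)
lemma inner_eq (cs : List Char) (a m : Int) (j0 : Nat) (h : j0 < cs.length) :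
    (PySem.List.pyRange (j0 : Int) ((cs.length : Int)) 1).foldl
        (fun m j =>
          if 10 * a + (((PySem.List.pyGetD cs j ' ').toNat : Int) - 48) > m
            then 10 * a + (((PySem.List.pyGetD cs j ' ').toNat : Int) - 48) else m) m
      = max m (10 * a + (pvPairBest (cs.drop j0)).2) := by
  have hlt : (j0 : Int) < (cs.length : Int) := by exact_mod_cast h
  rw [PySem.List.pyRange_one_cons hlt, List.foldl_cons]
  rw [List.drop_eq_getElem_cons h]
  have hget : PySem.List.pyGetD cs (j0 : Int) ' ' = cs[j0] := by
    rw [PySem.List.pyGetD_natCast, List.getD_eq_getElem _ _ h]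
  by_cases h2 : j0 + 1 < cs.length
  · have hc : ((j0 : Int) + 1) = ((j0 + 1 : Nat) : Int) := by push_cast; ring
    rw [hc, inner_eq cs a _ (j0 + 1) h2]
    have hne : cs.drop (j0 + 1) ≠ [] := by rw [Ne, List.drop_eq_nil_iff]; omega
    obtain ⟨y, ys, hys⟩ := List.exists_cons_of_ne_nil hne
    rw [hys, pvPairBest_cons]
    simp only [hget]
    split <;> split <;> omega
  · have hj : cs.length = j0 + 1 := by omega
    have hnil : cs.drop (j0 + 1) = [] := by simp [List.drop_eq_nil_iff, hj]
    have hrnil : PySem.List.pyRange ((j0 : Int) + 1) ((cs.length : Int)) 1 = [] := by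
      apply PySem.List.pyRange_one_eq_nil; omega
    rw [hrnil, List.foldl_nil, hnil]
    simp only [hget, pvPairBest]
    split <;> omega
termination_by cs.length - j0
decreasing_by omega

-- A's outer loop from index i0 computes max m (best pair value of the suffix)
lemma outer_eq (cs : List Char) (m : Int) (hm : 0 ≤ m) (i0 : Nat) (h : i0 + 1 ≤ cs.length) :
    (PySem.List.pyRange (i0 : Int) ((cs.length : Int) - 1) 1).foldl
        (fun maxVal i =>
          (PySem.List.pyRange (i + 1) ((cs.length : Int)) 1).foldl
            (fun m j =>
              if 10 * (((PySem.List.pyGetD cs i ' ').toNat : Int) - 48)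
                    + (((PySem.List.pyGetD cs j ' ').toNat : Int) - 48) > m
                then 10 * (((PySem.List.pyGetD cs i ' ').toNat : Int) - 48)
                    + (((PySem.List.pyGetD cs j ' ').toNat : Int) - 48) else m)
            maxVal) m
      = max m (pvPairBest (cs.drop i0)).1 := by
  have hget : PySem.List.pyGetD cs (i0 : Int) ' ' = cs[i0]'(by omega) := by
    rw [PySem.List.pyGetD_natCast, List.getD_eq_getElem _ _ (by omega)]
  by_cases h2 : i0 + 1 < cs.length
  · have hlt : (i0 : Int) < (cs.length : Int) - 1 := by
      have : (i0 : Int) + 1 < (cs.length : Int) := by exact_mod_cast h2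
      omega
    rw [PySem.List.pyRange_one_cons hlt, List.foldl_cons]
    simp only [hget]
    have hc : ((i0 : Int) + 1) = ((i0 + 1 : Nat) : Int) := by push_cast; ring
    rw [hc, inner_eq cs _ m (i0 + 1) h2]
    rw [outer_eq cs _ (le_max_of_le_left hm) (i0 + 1) (by omega)]
    rw [List.drop_eq_getElem_cons (by omega : i0 < cs.length)]
    have hne : cs.drop (i0 + 1) ≠ [] := by rw [Ne, List.drop_eq_nil_iff]; omega
    obtain ⟨y, ys, hys⟩ := List.exists_cons_of_ne_nil hne
    rw [hys, pvPairBest_cons]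
    dsimp only
    split <;> omega
  · have hj : cs.length = i0 + 1 := by omega
    have hrnil : PySem.List.pyRange (i0 : Int) ((cs.length : Int) - 1) 1 = [] := by
      apply PySem.List.pyRange_one_eq_nil; omega
    rw [hrnil, List.foldl_nil]
    rw [List.drop_eq_getElem_cons (by omega : i0 < cs.length)]
    have hnil : cs.drop (i0 + 1) = [] := by simp [List.drop_eq_nil_iff, hj]
    rw [hnil]
    dsimp only [pvPairBest]
    omega
termination_by cs.length - i0
decreasing_by omega

-- ===== VERDICT (by name: the statement is the Claim_ definition above) =====
theorem max_two_digit_from_line_spec : Claim_equal_max_two_digit_from_line := by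
  intro s _
  unfold Spec_max_two_digit_from_line max_two_digit_from_line max_two_digit_from_line_alt
  simp only [PySem.Str.len_eq]
  by_cases hlen : ((s.toList.length : Int)) < 2
  · rw [if_pos hlen, if_pos hlen]
  · rw [if_neg hlen, if_neg hlen]
    have h2 : 2 ≤ s.toList.length := by exact_mod_cast not_lt.mp hlen
    have h0 : (0 : Int) = ((0 : Nat) : Int) := by norm_num
    rw [h0, outer_eq s.toList ((0 : Nat) : Int) (by norm_num) 0 (by omega), List.drop_zero]
    have := pvPairBest_fst_nonneg s.toList
    omega
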